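-- pv_equiv track=rewrite | github.com/WarHak511/training_exercises | lists_and_dict.py | get_two_list
-- ===== SOURCE A (Python) =====
-- def get_two_list(nums: list):
--     positive_nums = []
--     negative_nums = []
--     for num in nums:
--         if num > 0:
--             positive_nums.append(num)
--         elif num < 0:
--             negative_nums.append(num)
--     positive_nums.sort()
--     negative_nums.sort()
--     return positive_nums, negative_nums
-- ===== SOURCE B (Python) =====
-- def get_two_list(nums: list):
--     counts = {}
--     for num in nums:
--         counts[num] = counts.get(num, 0) + 1
--     pos = []
--     neg = []
--     for k in sorted(counts):
--         if k > 0: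
--             pos += [k] * counts[k]
--         elif k < 0:
--             neg += [k] * counts[k]
--     return pos, neg
-- ===== Notes on version B (the rewrite author's own statement) =====
-- stated objective: alternative
-- what changed: B replaces sorting the partitioned element lists with a counting strategy: it builds a frequency dictionary in one pass, sorts only the distinct keys, and emits each key replicated by its count into the positive or negative list.
import Mathlib
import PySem

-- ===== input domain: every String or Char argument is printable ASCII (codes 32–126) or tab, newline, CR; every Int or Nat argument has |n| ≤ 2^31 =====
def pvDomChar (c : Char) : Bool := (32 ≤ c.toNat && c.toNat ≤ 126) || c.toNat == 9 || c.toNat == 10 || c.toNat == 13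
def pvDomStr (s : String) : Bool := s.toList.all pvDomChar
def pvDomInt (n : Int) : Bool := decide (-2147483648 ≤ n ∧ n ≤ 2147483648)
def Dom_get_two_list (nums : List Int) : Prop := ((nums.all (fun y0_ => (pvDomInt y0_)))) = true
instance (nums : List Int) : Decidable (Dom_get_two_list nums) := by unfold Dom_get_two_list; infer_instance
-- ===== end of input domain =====

-- B builds a frequency dictionary in one pass, sorts only the distinct keys and emits
-- each key replicated by its count, instead of sorting the partitioned element lists.

-- ===== PORT A =====
def get_two_list (nums : List Int) : List Int × List Int :=
  let st := nums.foldl (fun (acc : List Int × List Int) num =>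
    if num > 0 then (acc.1 ++ [num], acc.2)
    else if num < 0 then (acc.1, acc.2 ++ [num])
    else acc) ([], [])
  (PySem.List.sorted st.1 (fun x => x) false, PySem.List.sorted st.2 (fun x => x) false)

-- ===== PORT B =====
def get_two_list_alt (nums : List Int) : List Int × List Int :=
  let counts := nums.foldl (fun (d : PySem.Dict Int Int) num => d.insert num (d.getD num 0 + 1)) PySem.Dict.empty
  let ks := PySem.List.sorted counts.keys (fun x => x) false
  ks.foldl (fun (acc : List Int × List Int) k =>
    if k > 0 then (acc.1 ++ PySem.List.pyRepeat [k] (counts.getD k 0), acc.2)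
    else if k < 0 then (acc.1, acc.2 ++ PySem.List.pyRepeat [k] (counts.getD k 0))
    else acc) ([], [])

-- ===== PRECONDITION & SPEC =====
def Spec_get_two_list (nums : List Int) (out : List Int × List Int) : Prop := out = get_two_list_alt nums
instance (nums : List Int) (out : List Int × List Int) : Decidable (Spec_get_two_list nums out) := by unfold Spec_get_two_list; infer_instance

-- ===== CLAIM =====
def Claim_equal_get_two_list : Prop := ∀ (nums : List Int), Dom_get_two_list nums → Spec_get_two_list nums (get_two_list nums)

-- ===== LEMMAS AND PROOFS =====

-- A's partition loop is the two filters of the input, prefixed by the accumulators.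
theorem pv_fold_partition (nums : List Int) : ∀ (p n : List Int),
    nums.foldl (fun (acc : List Int × List Int) num =>
      if num > 0 then (acc.1 ++ [num], acc.2)
      else if num < 0 then (acc.1, acc.2 ++ [num])
      else acc) (p, n)
    = (p ++ nums.filter (fun x => decide (x > 0)), n ++ nums.filter (fun x => decide (x < 0))) := by
  induction nums with
  | nil => simp
  | cons x xs ih =>
    intro p n
    by_cases hx : x > 0
    · have hx' : ¬ x < 0 := by omega
      simp [List.foldl_cons, hx, hx', ih]
    · by_cases hx2 : x < 0
      · simp [List.foldl_cons, hx, hx2, ih]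
      · simp [List.foldl_cons, hx, hx2, ih]

-- B's emission loop is the two flatMaps over the filtered key list, prefixed by the accumulators.
theorem pv_fold_emit (c : Int → Int) (ks : List Int) : ∀ (p n : List Int),
    ks.foldl (fun (acc : List Int × List Int) k =>
      if k > 0 then (acc.1 ++ PySem.List.pyRepeat [k] (c k), acc.2)
      else if k < 0 then (acc.1, acc.2 ++ PySem.List.pyRepeat [k] (c k))
      else acc) (p, n)
    = (p ++ (ks.filter (fun k => decide (k > 0))).flatMap (fun k => PySem.List.pyRepeat [k] (c k)),
       n ++ (ks.filter (fun k => decide (k < 0))).flatMap (fun k => PySem.List.pyRepeat [k] (c k))) := by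
  induction ks with
  | nil => simp
  | cons x xs ih =>
    intro p n
    simp only [List.foldl_cons]
    by_cases hx : x > 0
    · have hx' : ¬ x < 0 := by omega
      rw [if_pos hx, ih]
      simp [hx, hx', List.append_assoc]
    · by_cases hx2 : x < 0
      · rw [if_neg hx, if_pos hx2, ih]
        simp [hx, hx2, List.append_assoc]
      · rw [if_neg hx, if_neg hx2, ih]
        simp [hx, hx2]

-- Blocks of equal elements emitted along a strictly increasing key list are sorted (≤).
theorem pv_pairwise_flatMap (c : Int → Nat) : ∀ (ks : List Int), ks.Pairwise (· < ·) →
    (ks.flatMap (fun k => List.replicate (c k) k)).Pairwise (· ≤ ·) := by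
  intro ks
  induction ks with
  | nil => simp
  | cons x xs ih =>
    intro h
    rw [List.pairwise_cons] at h
    simp only [List.flatMap_cons]
    rw [List.pairwise_append]
    refine ⟨List.pairwise_replicate.2 (Or.inr le_rfl), ih h.2, ?_⟩
    intro a ha b hb
    rw [List.eq_of_mem_replicate ha]
    rcases List.mem_flatMap.1 hb with ⟨k, hk, hbk⟩
    rw [List.eq_of_mem_replicate hbk]
    exact le_of_lt (h.1 k hk)

-- Count of any value in the emitted blocks (keys distinct).
theorem pv_count_flatMap (c : Int → Nat) : ∀ (ks : List Int), ks.Nodup → ∀ (x : Int),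
    (ks.flatMap (fun k => List.replicate (c k) k)).count x = if x ∈ ks then c x else 0 := by
  intro ks
  induction ks with
  | nil => simp
  | cons k xs ih =>
    intro h x
    rw [List.nodup_cons] at h
    simp only [List.flatMap_cons, List.count_append, List.count_replicate, ih h.2 x]
    by_cases hx : x = k
    · subst hx
      simp [h.1]
    · simp [hx, Ne.symm hx]

-- Core fact: emitting counts along the sorted distinct keys that satisfy p
-- produces exactly the sorted filtered list.
theorem pv_emit_eq_sorted (nums : List Int) (p : Int → Bool) :
    PySem.List.sorted (nums.filter p) (fun x => x) false
    = ((PySem.List.sorted (PySem.Set.ofList nums) (fun x => x) false).filter p).flatMap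
        (fun k => List.replicate (nums.count k) k) := by
  set ks := PySem.List.sorted (PySem.Set.ofList nums) (fun x => x) false with hks
  have hlt : ks.Pairwise (· < ·) := PySem.List.sorted_ofList_pairwise_lt nums
  have hflt : (ks.filter p).Pairwise (· < ·) := hlt.filter p
  have hnd : (ks.filter p).Nodup := List.Pairwise.imp ne_of_lt hflt
  have hmem : ∀ x : Int, x ∈ ks ↔ x ∈ nums := by
    intro x
    simp [hks, PySem.List.mem_sorted, PySem.Set.mem_ofList]
  apply PySem.List.sorted_id_eq_of_perm_of_pairwise
  · rw [List.perm_iff_count]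
    intro x
    rw [pv_count_flatMap (fun k => nums.count k) (ks.filter p) hnd x]
    by_cases hxk : x ∈ ks.filter p
    · rw [if_pos hxk]
      rcases List.mem_filter.1 hxk with ⟨_, hp⟩
      exact (List.count_filter (p := p) hp).symm
    · rw [if_neg hxk]
      by_cases hpx : p x = true
      · have hxn : x ∉ nums := by
          intro hxn
          exact hxk (List.mem_filter.2 ⟨(hmem x).2 hxn, hpx⟩)
        symm
        rw [List.count_eq_zero]
        intro hmemf
        exact hxn (List.mem_of_mem_filter hmemf)
      · symm
        rw [List.count_eq_zero]
        intro hmemf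
        exact hpx (List.of_mem_filter hmemf)
  · exact pv_pairwise_flatMap (fun k => nums.count k) (ks.filter p) hflt

-- ===== VERDICT =====
theorem get_two_list_spec : Claim_equal_get_two_list := by
  intro nums _
  unfold Spec_get_two_list get_two_list get_two_list_alt
  rw [pv_fold_partition nums [] []]
  rw [PySem.Dict.foldl_insert_getD_add_one_eq_counter nums]
  rw [pv_fold_emit (fun k => (PySem.Dict.counter nums).getD k 0) _ [] []]
  simp only [List.nil_append, PySem.Dict.keys_counter]
  have hrep : ∀ (ks : List Int),
      ks.flatMap (fun k => PySem.List.pyRepeat [k] ((PySem.Dict.counter nums).getD k 0))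
      = ks.flatMap (fun k => List.replicate (nums.count k) k) := by
    intro ks
    apply List.flatMap_congr
    intro k _
    rw [PySem.List.pyRepeat_singleton, PySem.Dict.getD_counter]
    simp
  rw [hrep, hrep, ← pv_emit_eq_sorted nums (fun x => decide (x > 0)),
      ← pv_emit_eq_sorted nums (fun x => decide (x < 0))]
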